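-- pv_equiv track=rewrite | github.com/TolesaD/telegram-ocr-bot | ocr_engine/language_support.py | get_tesseract_code
-- ===== SOURCE A (Python) =====
-- TESSERACT_LANGUAGES = {
--     'af': 'afr', 'am': 'amh', 'ar': 'ara', 'as': 'asm', 'az': 'aze',
--     'be': 'bel', 'bg': 'bul', 'bn': 'ben', 'bo': 'bod', 'bs': 'bos',
--     'ca': 'cat', 'ceb': 'ceb', 'cs': 'ces', 'cy': 'cym', 'da': 'dan',
--     'de': 'deu', 'dz': 'dzo', 'el': 'ell', 'en': 'eng', 'eo': 'epo',
--     'es': 'spa', 'et': 'est', 'eu': 'eus', 'fa': 'fas', 'fi': 'fin',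
--     'fr': 'fra', 'ga': 'gle', 'gd': 'gla', 'gl': 'glg', 'gu': 'guj',
--     'he': 'heb', 'hi': 'hin', 'hr': 'hrv', 'hu': 'hun', 'hy': 'hye',
--     'id': 'ind', 'is': 'isl', 'it': 'ita', 'ja': 'jpn', 'jw': 'jav',
--     'ka': 'kat', 'kk': 'kaz', 'km': 'khm', 'kn': 'kan', 'ko': 'kor',
--     'ku': 'kur', 'ky': 'kir', 'la': 'lat', 'lb': 'ltz', 'lo': 'lao',
--     'lt': 'lit', 'lv': 'lav', 'mg': 'mlg', 'mi': 'mri', 'mk': 'mkd',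
--     'ml': 'mal', 'mn': 'mon', 'mr': 'mar', 'ms': 'msa', 'mt': 'mlt',
--     'my': 'mya', 'ne': 'nep', 'nl': 'nld', 'no': 'nor', 'ny': 'nya',
--     'or': 'ori', 'pa': 'pan', 'pl': 'pol', 'ps': 'pus', 'pt': 'por',
--     'ro': 'ron', 'ru': 'rus', 'sa': 'san', 'sd': 'snd', 'si': 'sin',
--     'sk': 'slk', 'sl': 'slv', 'sm': 'smo', 'sn': 'sna', 'so': 'som',
--     'sq': 'sqi', 'sr': 'srp', 'st': 'sot', 'su': 'sun', 'sv': 'swe',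
--     'sw': 'swa', 'ta': 'tam', 'te': 'tel', 'tg': 'tgk', 'th': 'tha',
--     'tk': 'tuk', 'tl': 'tgl', 'tr': 'tur', 'tt': 'tat', 'ug': 'uig',
--     'uk': 'ukr', 'ur': 'urd', 'uz': 'uzb', 'vi': 'vie', 'xh': 'xho',
--     'yi': 'yid', 'yo': 'yor', 'zh': 'chi_sim+chi_tra', 'zu': 'zul'
-- }
--
-- SCRIPT_FAMILIES = {
--     'Latin': ['en', 'es', 'fr', 'de', 'it', 'pt', 'pl', 'nl', 'sv', 'tr', 'vi', 'ro', 'nl', 'da', 'no', 'fi', 'cs', 'hu', 'sk', 'sl', 'hr', 'bs', 'sr', 'et', 'lv', 'lt', 'mt', 'ga', 'gd', 'cy', 'ca', 'gl', 'eu', 'is', 'fo', 'ms', 'id', 'sw', 'so', 'ha', 'yo', 'ig', 'af', 'zu', 'xh', 'st', 'tn', 'ts', 'ss', 've', 'nr', 'nso'],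
--     'Cyrillic': ['ru', 'uk', 'be', 'bg', 'sr', 'mk', 'mn', 'kk', 'ky', 'tg', 'uz', 'tt'],
--     'Arabic': ['ar', 'fa', 'ur', 'ps', 'sd', 'ku', 'ug'],
--     'Devanagari': ['hi', 'ne', 'mr', 'sa', 'mai', 'bh', 'awa'],
--     'Bengali': ['bn', 'as'],
--     'Chinese': ['zh'],
--     'Japanese': ['ja'],
--     'Korean': ['ko'],
--     'Ethiopic': ['am', 'ti'],
--     'Thai': ['th'],
--     'Hebrew': ['he'],
--     'Greek': ['el'],
--     'Tamil': ['ta'],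
--     'Telugu': ['te'],
--     'Kannada': ['kn'],
--     'Malayalam': ['ml'],
--     'Sinhala': ['si'],
--     'Burmese': ['my'],
--     'Georgian': ['ka'],
--     'Armenian': ['hy'],
--     'Lao': ['lo'],
--     'Khmer': ['km'],
--     'Tibetan': ['bo']
-- }
--
-- def get_script_family(lang_code):
--     """Get script family for language"""
--     for script, languages in SCRIPT_FAMILIES.items():
--         if lang_code in languages:
--             return script
--     return 'Latin'  # Default fallback
--
-- def get_tesseract_code(lang_code):
--     """Get Tesseract language code with intelligent fallbacks"""
--     # Direct mapping first
--     if lang_code in TESSERACT_LANGUAGES: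
--         return TESSERACT_LANGUAGES[lang_code]
--
--     # Try to find similar languages
--     script_family = get_script_family(lang_code)
--     script_languages = SCRIPT_FAMILIES.get(script_family, ['en'])
--
--     for similar_lang in script_languages:
--         if similar_lang in TESSERACT_LANGUAGES:
--             return TESSERACT_LANGUAGES[similar_lang]
--
--     # Ultimate fallback
--     return 'eng'
-- ===== SOURCE B (Python) =====
-- # Fully resolved lookup table: every language code that does NOT resolve to the
-- # default 'eng' (direct Tesseract mappings, plus script-family fallbacks such as
-- # mai->hin or ti->amh, resolved once).  Any other code -- unknown codes and the
-- # Latin-family codes without their own Tesseract model -- falls back to 'eng'.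
-- _TABLE = "af:afr am:amh ar:ara as:asm awa:hin az:aze be:bel bg:bul bh:hin bn:ben bo:bod bs:bos ca:cat ceb:ceb cs:ces cy:cym da:dan de:deu dz:dzo el:ell eo:epo es:spa et:est eu:eus fa:fas fi:fin fr:fra ga:gle gd:gla gl:glg gu:guj he:heb hi:hin hr:hrv hu:hun hy:hye id:ind is:isl it:ita ja:jpn jw:jav ka:kat kk:kaz km:khm kn:kan ko:kor ku:kur ky:kir la:lat lb:ltz lo:lao lt:lit lv:lav mai:hin mg:mlg mi:mri mk:mkd ml:mal mn:mon mr:mar ms:msa mt:mlt my:mya ne:nep nl:nld no:nor ny:nya or:ori pa:pan pl:pol ps:pus pt:por ro:ron ru:rus sa:san sd:snd si:sin sk:slk sl:slv sm:smo sn:sna so:som sq:sqi sr:srp st:sot su:sun sv:swe sw:swa ta:tam te:tel tg:tgk th:tha ti:amh tk:tuk tl:tgl tr:tur tt:tat ug:uig uk:ukr ur:urd uz:uzb vi:vie xh:xho yi:yid yo:yor zh:chi_sim+chi_tra zu:zul"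
--
-- _RESOLVED = {k: v for k, v in (entry.split(":") for entry in _TABLE.split())}
--
-- def get_tesseract_code(lang_code):
--     """Get Tesseract language code with intelligent fallbacks"""
--     return _RESOLVED.get(lang_code, 'eng')
-- ===== Notes on version B (the rewrite author's own statement) =====
-- stated objective: simpler
-- what changed: B replaces A's call-time script-family scan (with its inner membership loop) by one flat precomputed table of all non-default resolutions, encoded as a compact colon-separated string parsed once at import, so get_tesseract_code becomes a single dict lookup falling back to the English default.
import Mathlib
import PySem

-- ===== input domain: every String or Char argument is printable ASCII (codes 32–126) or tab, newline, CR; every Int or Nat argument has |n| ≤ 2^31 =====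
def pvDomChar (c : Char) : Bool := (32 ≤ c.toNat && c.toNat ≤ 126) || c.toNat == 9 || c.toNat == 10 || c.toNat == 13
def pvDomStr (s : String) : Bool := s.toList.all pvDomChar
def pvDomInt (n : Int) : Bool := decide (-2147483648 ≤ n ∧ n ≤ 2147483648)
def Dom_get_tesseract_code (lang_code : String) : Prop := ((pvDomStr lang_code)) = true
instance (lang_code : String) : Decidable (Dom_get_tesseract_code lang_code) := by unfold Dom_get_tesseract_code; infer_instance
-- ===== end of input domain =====

set_option maxHeartbeats 4000000
set_option maxRecDepth 100000

-- B replaces A's call-time script-family scan with one flat resolved table (non-default entries only, encoded as a compact string parsed once); equal return values on all inputs.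

-- ===== PORT A =====
def TESSERACT_LANGUAGES : PySem.Dict String String := PySem.Dict.mk [("af", "afr"), ("am", "amh"), ("ar", "ara"), ("as", "asm"), ("az", "aze"), ("be", "bel"), ("bg", "bul"), ("bn", "ben"), ("bo", "bod"), ("bs", "bos"), ("ca", "cat"), ("ceb", "ceb"), ("cs", "ces"), ("cy", "cym"), ("da", "dan"), ("de", "deu"), ("dz", "dzo"), ("el", "ell"), ("en", "eng"), ("eo", "epo"), ("es", "spa"), ("et", "est"), ("eu", "eus"), ("fa", "fas"), ("fi", "fin"), ("fr", "fra"), ("ga", "gle"), ("gd", "gla"), ("gl", "glg"), ("gu", "guj"), ("he", "heb"), ("hi", "hin"), ("hr", "hrv"), ("hu", "hun"), ("hy", "hye"), ("id", "ind"), ("is", "isl"), ("it", "ita"), ("ja", "jpn"), ("jw", "jav"), ("ka", "kat"), ("kk", "kaz"), ("km", "khm"), ("kn", "kan"), ("ko", "kor"), ("ku", "kur"), ("ky", "kir"), ("la", "lat"), ("lb", "ltz"), ("lo", "lao"), ("lt", "lit"), ("lv", "lav"), ("mg", "mlg"), ("mi", "mri"), ("mk", "mkd"), ("ml", "mal"),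 ("mn", "mon"), ("mr", "mar"), ("ms", "msa"), ("mt", "mlt"), ("my", "mya"), ("ne", "nep"), ("nl", "nld"), ("no", "nor"), ("ny", "nya"), ("or", "ori"), ("pa", "pan"), ("pl", "pol"), ("ps", "pus"), ("pt", "por"), ("ro", "ron"), ("ru", "rus"), ("sa", "san"), ("sd", "snd"), ("si", "sin"), ("sk", "slk"), ("sl", "slv"), ("sm", "smo"), ("sn", "sna"), ("so", "som"), ("sq", "sqi"), ("sr", "srp"), ("st", "sot"), ("su", "sun"), ("sv", "swe"), ("sw", "swa"), ("ta", "tam"), ("te", "tel"), ("tg", "tgk"), ("th", "tha"), ("tk", "tuk"), ("tl", "tgl"), ("tr", "tur"), ("tt", "tat"), ("ug", "uig"), ("uk", "ukr"), ("ur", "urd"), ("uz", "uzb"), ("vi", "vie"), ("xh", "xho"), ("yi", "yid"), ("yo", "yor"), ("zh", "chi_sim+chi_tra"), ("zu", "zul")]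

def SCRIPT_FAMILIES : PySem.Dict String (List String) := PySem.Dict.mk [("Latin", ["en", "es", "fr", "de", "it", "pt", "pl", "nl", "sv", "tr", "vi", "ro", "nl", "da", "no", "fi", "cs", "hu", "sk", "sl", "hr", "bs", "sr", "et", "lv", "lt", "mt", "ga", "gd", "cy", "ca", "gl", "eu", "is", "fo", "ms", "id", "sw", "so", "ha", "yo", "ig", "af", "zu", "xh", "st", "tn", "ts", "ss", "ve", "nr", "nso"]), ("Cyrillic", ["ru", "uk", "be", "bg", "sr", "mk", "mn", "kk", "ky", "tg", "uz", "tt"]), ("Arabic", ["ar", "fa", "ur", "ps", "sd", "ku", "ug"]), ("Devanagari", ["hi", "ne", "mr", "sa", "mai", "bh", "awa"]), ("Bengali", ["bn", "as"]), ("Chinese", ["zh"]), ("Japanese", ["ja"]), ("Korean", ["ko"]), ("Ethiopic", ["am", "ti"]), ("Thai", ["th"]), ("Hebrew", ["he"]), ("Greek", ["el"]), ("Tamil", ["ta"]), ("Telugu", ["te"]), ("Kannada", ["kn"]), ("Malayalam", ["ml"]), ("Sinhala", ["si"]), ("Burmese", ["my"]), ("Georgian", ["ka"]), ("Armenian", ["hy"]),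 ("Lao", ["lo"]), ("Khmer", ["km"]), ("Tibetan", ["bo"])]

def get_script_family_go (lang_code : String) : List (String × List String) → String
  | [] => "Latin"
  | (script, languages) :: rest =>
      if languages.contains lang_code then script else get_script_family_go lang_code rest

def get_script_family (lang_code : String) : String :=
  get_script_family_go lang_code SCRIPT_FAMILIES.items

def get_tesseract_code_loop : List String → String
  | [] => "eng"
  | similar_lang :: rest =>
      match PySem.Dict.get? TESSERACT_LANGUAGES similar_lang with
      | some v => v
      | none => get_tesseract_code_loop rest

def get_tesseract_code (lang_code : String) : String :=
  match PySem.Dict.get? TESSERACT_LANGUAGES lang_code with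
  | some v => v
  | none =>
      let script_family := get_script_family lang_code
      let script_languages := PySem.Dict.getD SCRIPT_FAMILIES script_family ["en"]
      get_tesseract_code_loop script_languages

-- ===== PORT B =====
def TABLE : String := "af:afr am:amh ar:ara as:asm awa:hin az:aze be:bel bg:bul bh:hin bn:ben bo:bod bs:bos ca:cat ceb:ceb cs:ces cy:cym da:dan de:deu dz:dzo el:ell eo:epo es:spa et:est eu:eus fa:fas fi:fin fr:fra ga:gle gd:gla gl:glg gu:guj he:heb hi:hin hr:hrv hu:hun hy:hye id:ind is:isl it:ita ja:jpn jw:jav ka:kat kk:kaz km:khm kn:kan ko:kor ku:kur ky:kir la:lat lb:ltz lo:lao lt:lit lv:lav mai:hin mg:mlg mi:mri mk:mkd ml:mal mn:mon mr:mar ms:msa mt:mlt my:mya ne:nep nl:nld no:nor ny:nya or:ori pa:pan pl:pol ps:pus pt:por ro:ron ru:rus sa:san sd:snd si:sin sk:slk sl:slv sm:smo sn:sna so:som sq:sqi sr:srp st:sot su:sun sv:swe sw:swa ta:tam te:tel tg:tgk th:tha ti:amh tk:tuk tl:tgl tr:tur tt:tat ug:uig uk:ukr ur:urd uz:uzb vi:vie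 xh:xho yi:yid yo:yor zh:chi_sim+chi_tra zu:zul"

-- entry.split(":") always yields exactly [k, v] on the literal table; Python would raise on anything else (unreachable)
def parseEntry (entry : String) : String × String :=
  match PySem.Str.split? entry ":" with
  | some [k, v] => (k, v)
  | _ => ("", "")

def RESOLVED : PySem.Dict String String :=
  PySem.Dict.mk ((PySem.Str.split₀ TABLE).map parseEntry)

def get_tesseract_code_alt (lang_code : String) : String :=
  PySem.Dict.getD RESOLVED lang_code "eng"

-- ===== PRECONDITION & SPEC =====
def Spec_get_tesseract_code (lang_code : String) (out : String) : Prop := out = get_tesseract_code_alt lang_code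
instance (lang_code : String) (out : String) : Decidable (Spec_get_tesseract_code lang_code out) := by unfold Spec_get_tesseract_code; infer_instance

-- ===== CLAIM (what is proved, stated in full; the proofs are below) =====
def Claim_equal_get_tesseract_code : Prop := ∀ (lang_code : String), Dom_get_tesseract_code lang_code → Spec_get_tesseract_code lang_code (get_tesseract_code lang_code)

-- ===== LEMMAS AND PROOFS =====

-- the parsed table, as a literal (checked by kernel evaluation)
def RESOLVED_LIT : PySem.Dict String String := PySem.Dict.mk [("af", "afr"), ("am", "amh"), ("ar", "ara"), ("as", "asm"), ("awa", "hin"), ("az", "aze"), ("be", "bel"), ("bg", "bul"), ("bh", "hin"), ("bn", "ben"), ("bo", "bod"), ("bs", "bos"), ("ca", "cat"), ("ceb", "ceb"), ("cs", "ces"), ("cy", "cym"), ("da", "dan"), ("de", "deu"), ("dz", "dzo"), ("el", "ell"), ("eo", "epo"), ("es", "spa"), ("et", "est"), ("eu", "eus"), ("fa", "fas"), ("fi", "fin"), ("fr", "fra"), ("ga", "gle"), ("gd", "gla"), ("gl", "glg"), ("gu", "guj"), ("he", "heb"), ("hi", "hin"), ("hr", "hrv"), ("hu", "hun"), ("hy",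 "hye"), ("id", "ind"), ("is", "isl"), ("it", "ita"), ("ja", "jpn"), ("jw", "jav"), ("ka", "kat"), ("kk", "kaz"), ("km", "khm"), ("kn", "kan"), ("ko", "kor"), ("ku", "kur"), ("ky", "kir"), ("la", "lat"), ("lb", "ltz"), ("lo", "lao"), ("lt", "lit"), ("lv", "lav"), ("mai", "hin"), ("mg", "mlg"), ("mi", "mri"), ("mk", "mkd"), ("ml", "mal"), ("mn", "mon"), ("mr", "mar"), ("ms", "msa"), ("mt", "mlt"), ("my", "mya"), ("ne", "nep"), ("nl", "nld"), ("no", "nor"), ("ny", "nya"), ("or", "ori"), ("pa", "pan"), ("pl", "pol"), ("ps", "pus"), ("pt", "por"), ("ro", "ron"), ("ru", "rus"), ("sa", "san"), ("sd", "snd"), ("si", "sin"), ("sk", "slk"), ("sl", "slv"), ("sm", "smo"), ("sn", "sna"), ("so", "som"), ("sq", "sqi"), ("sr", "srp"), ("st", "sot"), ("su", "sun"), ("sv", "swe"), ("sw", "swa"), ("ta", "tam"), ("te", "tel"), ("tg", "tgk"), ("th", "tha"), ("ti", "amh"), ("tk", "tuk"), ("tl", "tgl"), ("tr", "tur"), ("tt",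 "tat"), ("ug", "uig"), ("uk", "ukr"), ("ur", "urd"), ("uz", "uzb"), ("vi", "vie"), ("xh", "xho"), ("yi", "yid"), ("yo", "yor"), ("zh", "chi_sim+chi_tra"), ("zu", "zul")]

lemma resolved_eq : RESOLVED = RESOLVED_LIT := by decide

lemma alt_eq_lit (k : String) : get_tesseract_code_alt k = PySem.Dict.getD RESOLVED_LIT k "eng" := by
  unfold get_tesseract_code_alt; rw [resolved_eq]

-- every code occurring anywhere in A's tables (direct keys or any family member)
def ALL_KEYS : List String := ["af", "am", "ar", "as", "awa", "az", "be", "bg", "bh", "bn", "bo", "bs", "ca", "ceb", "cs", "cy", "da", "de", "dz", "el", "en", "eo", "es", "et", "eu", "fa", "fi", "fo", "fr", "ga", "gd", "gl", "gu", "ha", "he", "hi", "hr", "hu", "hy", "id", "ig", "is", "it", "ja", "jw", "ka", "kk", "km", "kn", "ko", "ku", "ky", "la", "lb", "lo", "lt", "lv", "mai", "mg", "mi", "mk", "ml", "mn", "mr", "ms", "mt", "my", "ne", "nl", "no", "nr", "nso", "ny", "or", "pa", "pl", "ps", "pt", "ro", "ru", "sa", "sd", "si", "sk", "sl", "sm",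 "sn", "so", "sq", "sr", "ss", "st", "su", "sv", "sw", "ta", "te", "tg", "th", "ti", "tk", "tl", "tn", "tr", "ts", "tt", "ug", "uk", "ur", "uz", "ve", "vi", "xh", "yi", "yo", "zh", "zu"]

lemma contains_false_of_subset {k : String} {l L : List String} (hsub : l ⊆ L) (h : k ∉ L) :
    l.contains k = false := by
  simp only [List.contains_eq_mem, decide_eq_false_iff_not]
  exact fun hm => h (hsub hm)

lemma go_latin (k : String) : ∀ items : List (String × List String),
    (∀ p ∈ items, p.2.contains k = false) → get_script_family_go k items = "Latin" := by
  intro items h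
  induction items with
  | nil => rfl
  | cons p rest ih =>
    obtain ⟨s, langs⟩ := p
    simp only [get_script_family_go, h (s, langs) (by simp)]
    exact ih (fun q hq => h q (List.mem_cons_of_mem _ hq))

lemma key_lemma (k : String) : get_tesseract_code k = PySem.Dict.getD RESOLVED_LIT k "eng" := by
  by_cases h : k ∈ ALL_KEYS
  · fin_cases h <;> decide
  · have hT : PySem.Dict.get? TESSERACT_LANGUAGES k = none := by
      rw [PySem.Dict.get?_eq_none_iff_not_mem_keys]
      intro hm
      have hsub : TESSERACT_LANGUAGES.keys ⊆ ALL_KEYS := by decide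
      exact h (hsub hm)
    have hfam : ∀ p ∈ SCRIPT_FAMILIES.items, p.2.contains k = false := by
      intro p hp
      fin_cases hp <;>
        exact contains_false_of_subset (by decide) h
    have hsf : get_script_family k = "Latin" := go_latin k SCRIPT_FAMILIES.items hfam
    have hA : get_tesseract_code k
        = get_tesseract_code_loop (PySem.Dict.getD SCRIPT_FAMILIES (get_script_family k) ["en"]) := by
      unfold get_tesseract_code; rw [hT]
    rw [hA, hsf]
    have hc : RESOLVED_LIT.contains k = false := by
      have hsub : RESOLVED_LIT.keys ⊆ ALL_KEYS := by decide
      rw [PySem.Dict.contains_eq_decide_mem_keys]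
      simp only [decide_eq_false_iff_not]
      exact fun hm => h (hsub hm)
    rw [PySem.Dict.getD_of_not_contains _ _ hc]
    decide

-- ===== VERDICT (by name: the statement is the Claim_ definition above) =====
theorem get_tesseract_code_spec : Claim_equal_get_tesseract_code := by
  intro k _
  unfold Spec_get_tesseract_code
  rw [key_lemma, alt_eq_lit]
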